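-- pv_equiv track=rewrite | github.com/qq6510/mij2 | script/sort-adblock.py | is_wildcard_valid
-- ===== SOURCE A (Python) =====
-- def is_wildcard_valid(domain):
--     """检查星号是否合法：星号必须独立成段"""
--     if '*' not in domain:
--         return True
--     parts = domain.split('.')
--     for p in parts:
--         if '*' in p and p != '*':
--             return False
--     return True
-- ===== SOURCE B (Python) =====
-- def is_wildcard_valid(domain):
--     """检查星号是否合法：星号必须独立成段"""
--     prev = None
--     n = len(domain)
--     for i, ch in enumerate(domain):
--         if ch == '*':
--             if not (prev is None or prev == '.'):
--                 return False
--             if i + 1 < n and domain[i + 1] != '.':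
--                 return False
--         prev = ch
--     return True
-- ===== Notes on version B (the rewrite author's own statement) =====
-- stated objective: alternative
-- what changed: B never splits the domain into segments: it makes one character scan tracking the previous character and, at each asterisk, checks that the neighbor before is a dot (or start of string) and the neighbor after is a dot (or end of string), which is equivalent to the asterisk forming its own dot-separated segment.
import Mathlib
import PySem

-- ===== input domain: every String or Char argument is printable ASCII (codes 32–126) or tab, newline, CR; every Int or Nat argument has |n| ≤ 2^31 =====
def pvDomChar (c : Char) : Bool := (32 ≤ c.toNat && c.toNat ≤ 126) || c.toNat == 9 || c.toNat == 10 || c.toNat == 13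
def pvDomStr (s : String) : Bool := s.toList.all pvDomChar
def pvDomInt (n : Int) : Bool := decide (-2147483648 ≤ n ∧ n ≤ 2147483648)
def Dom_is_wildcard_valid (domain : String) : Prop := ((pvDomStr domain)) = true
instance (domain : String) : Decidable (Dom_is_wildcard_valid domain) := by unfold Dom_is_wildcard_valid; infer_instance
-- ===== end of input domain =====

-- B replaces A's split-into-segments pass by a single character scan that checks each '*''s neighbors; same result, different decomposition.


-- ===== PORT A =====
-- the 'for p in parts' loop with its early 'return False'
def aLoop : List (List Char) → Bool
  | [] => true
  | p :: rest =>
    if PySem.Chars.isIn ['*'] p && decide (p ≠ ['*']) then false else aLoop rest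

def is_wildcard_valid (domain : String) : Bool :=
  if !(PySem.Str.isIn "*" domain) then true
  else aLoop (PySem.Chars.splitOn domain.toList ['.'])

-- ===== PORT B =====
-- the while loop: prev = previous character (none at the start), the list is the unread rest
def bGo : Option Char → List Char → Bool
  | _, [] => true
  | prev, c :: rest =>
    if c = '*' then
      if ¬ (prev = none ∨ prev = some '.') then false
      else if (match rest with | d :: _ => decide (d ≠ '.') | [] => false) then false
      else bGo (some c) rest
    else bGo (some c) rest

def is_wildcard_valid_alt (domain : String) : Bool := bGo none domain.toList

-- ===== PRECONDITION & SPEC =====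
def Spec_is_wildcard_valid (domain : String) (out : Bool) : Prop := out = is_wildcard_valid_alt domain
instance (domain : String) (out : Bool) : Decidable (Spec_is_wildcard_valid domain out) := by unfold Spec_is_wildcard_valid; infer_instance

-- ===== CLAIM (what is proved, stated in full; the proofs are below) =====
def Claim_equal_is_wildcard_valid : Prop := ∀ (domain : String), Dom_is_wildcard_valid domain → Spec_is_wildcard_valid domain (is_wildcard_valid domain)

-- ===== LEMMAS AND PROOFS =====

-- specification-side split on '.': (first segment, remaining segments)
def mySplit : List Char → List Char × List (List Char)
  | [] => ([], [])
  | c :: rest =>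
    if c = '.' then ([], (mySplit rest).1 :: (mySplit rest).2)
    else (c :: (mySplit rest).1, (mySplit rest).2)

-- the per-segment condition A's loop tests: not (contains '*' and ≠ "*")
def segOk (p : List Char) : Bool := !(p.contains '*' && !(p == ['*']))

lemma isIn_star (p : List Char) : PySem.Chars.isIn ['*'] p = p.contains '*' := by
  rcases h : p.contains '*' with _ | _
  · rw [PySem.Chars.isIn_eq_false_iff]
    intro hin
    have : '*' ∈ p := hin.subset (by simp)
    simp_all
  · rw [PySem.Chars.isIn_iff_infix]
    have : '*' ∈ p := by simpa using h
    obtain ⟨s, t, rfl⟩ := List.append_of_mem this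
    exact ⟨s, t, by simp⟩

lemma go_dot : ∀ (fuel : Nat) (l cur : List Char) (acc : List (List Char)), l.length < fuel →
    PySem.Chars.splitOn.go ['.'] fuel l cur acc
      = acc.reverse ++ ((cur.reverse ++ (mySplit l).1) :: (mySplit l).2) := by
  intro fuel
  induction fuel with
  | zero => intro l cur acc h; omega
  | succ n ih =>
    intro l cur acc h
    cases l with
    | nil => rw [PySem.Chars.splitOn.go.eq_def]; simp [mySplit]
    | cons c rest =>
      by_cases hc : c = '.'
      · subst hc
        rw [PySem.Chars.splitOn.go.eq_def]
        simp only [List.isPrefixOf, beq_self_eq_true, Bool.true_and, if_true]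
        rw [show List.drop (['.'].length) ('.' :: rest) = rest from rfl]
        rw [ih rest [] (List.reverse cur :: acc) (by simp at h ⊢; omega)]
        simp [mySplit]
      · rw [PySem.Chars.splitOn.go.eq_def]
        have hpre : List.isPrefixOf ['.'] (c :: rest) = false := by
          simp [List.isPrefixOf]
          exact fun hcc => absurd hcc.symm hc
        simp only [hpre, Bool.false_eq_true, if_false]
        rw [ih rest (c :: cur) acc (by simp at h ⊢; omega)]
        simp [mySplit, hc]

lemma splitOn_dot (l : List Char) :
    PySem.Chars.splitOn l ['.'] = (mySplit l).1 :: (mySplit l).2 := by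
  unfold PySem.Chars.splitOn
  rw [go_dot (l.length + 1) l [] [] (by omega)]
  simp

lemma aLoop_eq_all (ps : List (List Char)) : aLoop ps = ps.all segOk := by
  induction ps with
  | nil => rfl
  | cons p rest ih =>
    simp only [aLoop, List.all_cons, ih, isIn_star]
    by_cases h : (p.contains '*' && decide (p ≠ ['*'])) = true
    · rw [if_pos h]
      simp only [Bool.and_eq_true, decide_eq_true_iff] at h
      obtain ⟨h1, h2⟩ := h
      have hmem : '*' ∈ p := by simpa using h1
      have hok : segOk p = false := by simp [segOk, hmem, h2]
      rw [hok]
      rfl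
    · rw [if_neg h]
      rw [Bool.not_eq_true] at h
      have hok : segOk p = true := by
        unfold segOk
        rcases Bool.and_eq_false_iff.mp h with h1 | h2
        · rw [h1]; rfl
        · have : p = ['*'] := by simpa using h2
          subst this; rfl
      rw [hok]
      simp

lemma bGo_step (prev : Option Char) (c : Char) (rest : List Char) (hc : c ≠ '*') :
    bGo prev (c :: rest) = bGo (some c) rest := by
  rw [bGo.eq_def]; simp [hc]

-- the scan invariant: after a segment boundary the first segment must be legal,
-- mid-segment it must be star-free; the later segments must all be legal
lemma bGo_eq (l : List Char) : ∀ (prev : Option Char),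
    bGo prev l
      = ((if prev = none ∨ prev = some '.' then segOk (mySplit l).1
          else !(mySplit l).1.contains '*') && (mySplit l).2.all segOk) := by
  induction l with
  | nil => intro prev; by_cases h : prev = none ∨ prev = some '.' <;> simp [bGo, mySplit, segOk, h]
  | cons c rest ih =>
    intro prev
    by_cases hc : c = '*'
    · subst hc
      by_cases hp : prev = none ∨ prev = some '.'
      · cases rest with
        | nil => simp [bGo, hp, mySplit, segOk]
        | cons d rest' =>
          by_cases hd : d = '.'
          · subst hd
            have hstep : bGo prev ('*' :: '.' :: rest') = bGo (some '*') ('.' :: rest') := by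
              rw [bGo.eq_def]
              simp [hp]
            rw [hstep, ih (some '*')]
            simp [mySplit, segOk, hp]
          · have hstep : bGo prev ('*' :: d :: rest') = false := by
              rw [bGo.eq_def]
              simp [hp, hd]
            rw [hstep]
            have h1 : (mySplit ('*' :: d :: rest')).1 = '*' :: d :: (mySplit rest').1 := by
              simp [mySplit, hd]
            simp [h1, hp, segOk]
      · have hstep : bGo prev ('*' :: rest) = false := by
          rw [bGo.eq_def]
          simp [hp]
        rw [hstep]
        have h1 : (mySplit ('*' :: rest)).1 = '*' :: (mySplit rest).1 := by simp [mySplit]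
        simp [h1, hp]
    · by_cases hdot : c = '.'
      · subst hdot
        rw [bGo_step prev '.' rest (by simp), ih (some '.')]
        by_cases hp : prev = none ∨ prev = some '.' <;> simp [mySplit, segOk, hp]
      · rw [bGo_step prev c rest hc, ih (some c)]
        have h1 : (mySplit (c :: rest)).1 = c :: (mySplit rest).1 := by simp [mySplit, hdot]
        have h2 : (mySplit (c :: rest)).2 = (mySplit rest).2 := by simp [mySplit, hdot]
        have hce : (c == '*') = false := by simpa using hc
        by_cases hp : prev = none ∨ prev = some '.' <;>
          simp [h1, h2, segOk, hp, hce, hdot, Ne.symm hc]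

-- if '*' does not occur in l it occurs in no segment of l
lemma mySplit_no_star (l : List Char) (h : l.contains '*' = false) :
    (mySplit l).1.contains '*' = false ∧ ∀ p ∈ (mySplit l).2, p.contains '*' = false := by
  induction l with
  | nil => exact ⟨rfl, by simp [mySplit]⟩
  | cons c rest ih =>
    simp only [List.contains_cons, Bool.or_eq_false_iff] at h
    obtain ⟨hc, hrest⟩ := h
    obtain ⟨ih1, ih2⟩ := ih hrest
    by_cases hcd : c = '.'
    · subst hcd
      refine ⟨by simp [mySplit], ?_⟩
      intro p hp
      simp only [mySplit] at hp
      rcases List.mem_cons.mp hp with rfl | hp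
      · exact ih1
      · exact ih2 p hp
    · constructor
      · simp only [mySplit, hcd, if_false, List.contains_cons, Bool.or_eq_false_iff]
        exact ⟨hc, ih1⟩
      · intro p hp
        simp only [mySplit, hcd, if_false] at hp
        exact ih2 p hp

lemma segOk_of_no_star (p : List Char) (h : p.contains '*' = false) : segOk p = true := by
  unfold segOk
  rw [h]
  rfl

-- ===== VERDICT (by name: the statement is the Claim_ definition above) =====
theorem is_wildcard_valid_spec : Claim_equal_is_wildcard_valid := by
  intro domain _
  unfold Spec_is_wildcard_valid is_wildcard_valid is_wildcard_valid_alt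
  rw [bGo_eq domain.toList none]
  rw [if_pos (Or.inl rfl)]
  by_cases h : PySem.Str.isIn "*" domain = true
  · simp only [h, Bool.not_true, Bool.false_eq_true, if_false]
    rw [splitOn_dot, aLoop_eq_all]
    simp
  · rw [Bool.not_eq_true] at h
    simp only [h, Bool.not_false, if_true]
    have hstar : domain.toList.contains '*' = false := by
      rw [← isIn_star]
      simpa using h
    obtain ⟨h1, h2⟩ := mySplit_no_star domain.toList hstar
    rw [segOk_of_no_star _ h1]
    have hall : (mySplit domain.toList).2.all segOk = true := by
      rw [List.all_eq_true]
      intro p hp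
      exact segOk_of_no_star p (h2 p hp)
    rw [hall]
    rfl
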